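-- pv_equiv track=rewrite | github.com/erenelma/diffusion-experiments | gcn-gat-experiments/utility_functions.py | concatenate_strings
-- ===== SOURCE A (Python) =====
-- def concatenate_strings(str_list):
--   result = str(str_list[0])
--   for element in str_list[1:]:
--     if not isinstance(element, str):
--       element = str(element)
--     if element[0] != "." and result[-1]!= "/":
--       result += "-"
--     result += element
--   return result
-- ===== SOURCE B (Python) =====
-- def concatenate_strings(str_list):
--   parts = [x if isinstance(x, str) else str(x) for x in str_list]
--
--   def glue(lo, hi):
--     # divide and conquer: join parts[lo:hi]; the dash at the seam depends only
--     # on the adjacent pair parts[mid-1], parts[mid]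
--     if hi - lo <= 1:
--       return parts[lo]
--     mid = (lo + hi) // 2
--     if parts[mid][0] != "." and parts[mid - 1][-1] != "/":
--       return glue(lo, mid) + "-" + glue(mid, hi)
--     return glue(lo, mid) + glue(mid, hi)
--
--   return glue(0, len(parts))
-- ===== Notes on version B (the rewrite author's own statement) =====
-- stated objective: alternative
-- what changed: B joins by divide and conquer: it splits the converted list in halves, glues each half recursively and decides the dash at each seam from the adjacent pair parts[mid-1]/parts[mid], instead of A's single forward loop that appends to a mutable result and peeks at result[-1] for every dash.
import Mathlib
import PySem

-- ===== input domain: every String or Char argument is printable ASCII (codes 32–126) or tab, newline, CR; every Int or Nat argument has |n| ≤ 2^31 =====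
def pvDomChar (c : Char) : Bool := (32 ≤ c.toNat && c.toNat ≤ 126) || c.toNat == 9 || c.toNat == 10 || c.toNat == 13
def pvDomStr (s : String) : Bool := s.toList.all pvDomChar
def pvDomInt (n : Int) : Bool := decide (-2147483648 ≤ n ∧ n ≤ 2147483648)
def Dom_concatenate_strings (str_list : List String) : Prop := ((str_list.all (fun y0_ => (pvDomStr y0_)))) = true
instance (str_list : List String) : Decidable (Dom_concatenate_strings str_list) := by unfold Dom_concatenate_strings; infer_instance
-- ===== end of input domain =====

-- B replaces A's forward accumulate-and-peek loop (dash decided from the mutable result's last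
-- char) by a divide-and-conquer join: halves are glued recursively and each seam's dash is
-- decided from the adjacent pair of converted elements — objective: alternative algorithm.


-- ===== PORT A =====
-- the for-loop of A over str_list[1:], accumulator `result`; `element[0]` and `result[-1]`
-- are PySem.Str.pyGet? (none = IndexError, excluded by Pre_; the branch taken on `none` is
-- irrelevant on Pre_, where both lookups are `some`)
def pvALoop : List String → String → String
  | [], result => result
  | e :: rest, result =>
    let result :=
      if PySem.Str.pyGet? e 0 ≠ some '.' ∧ PySem.Str.pyGet? result (-1) ≠ some '/'
      then result ++ "-" else result
    pvALoop rest (result ++ e)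

def concatenate_strings (str_list : List String) : String :=
  match str_list with
  | [] => ""            -- str_list[0] raises IndexError here; excluded by Pre_
  | h :: t => pvALoop t h   -- result = str(str_list[0]); elements are already str on this domain

-- ===== PORT B =====
-- Source B's helper glue(lo, hi): divide and conquer over index ranges; parts[lo], parts[mid],
-- parts[mid-1] are in range whenever glue is reached on Pre_ inputs, so `getD _ ""` is exact
-- there (Python's IndexError on the empty list is excluded by Pre_)
def pvGlue (parts : List String) (lo hi : Nat) : String :=
  if hi ≤ lo + 1 then parts.getD lo ""
  else
    let mid := (lo + hi) / 2
    if PySem.Str.pyGet? (parts.getD mid "") 0 ≠ some '.' ∧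
       PySem.Str.pyGet? (parts.getD (mid - 1) "") (-1) ≠ some '/'
    then pvGlue parts lo mid ++ "-" ++ pvGlue parts mid hi
    else pvGlue parts lo mid ++ pvGlue parts mid hi
termination_by hi - lo
decreasing_by all_goals omega

def concatenate_strings_alt (str_list : List String) : String :=
  pvGlue str_list 0 str_list.length   -- parts = str_list: elements are already str on this domain

-- ===== PRECONDITION & SPEC =====
-- Pre_ = exactly the inputs where Python A returns: the list is nonempty, every tail element is
-- nonempty (element[0] raises on ""), and if the head is "" a nonempty tail must start with a
-- '.'-initial element (otherwise result[-1] raises on the empty running result).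
def Pre_concatenate_strings (str_list : List String) : Prop :=
  str_list ≠ [] ∧ (∀ s ∈ str_list.tail, s ≠ "") ∧
  (str_list.head? = some "" → ∀ s, str_list.tail.head? = some s → PySem.Str.pyGet? s 0 = some '.')
instance (str_list : List String) : Decidable (Pre_concatenate_strings str_list) := by
  unfold Pre_concatenate_strings; infer_instance

def pvWitness_concatenate_strings : List String := ["a/", "b", ".c", "d"]

def Spec_concatenate_strings (str_list : List String) (out : String) : Prop := out = concatenate_strings_alt str_list
instance (str_list : List String) (out : String) : Decidable (Spec_concatenate_strings str_list out) := by unfold Spec_concatenate_strings; infer_instance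

-- ===== CLAIM (what is proved, stated in full; the proofs are below) =====
def Claim_equal_concatenate_strings : Prop := ∀ (str_list : List String), Dom_concatenate_strings str_list → Pre_concatenate_strings str_list → Spec_concatenate_strings str_list (concatenate_strings str_list)

-- ===== LEMMAS AND PROOFS =====

-- linear "specification" join: separator before element i, then elements i, i+1, …, hi-1
def pvSep (parts : List String) (i : Nat) : String :=
  if PySem.Str.pyGet? (parts.getD i "") 0 ≠ some '.' ∧
     PySem.Str.pyGet? (parts.getD (i - 1) "") (-1) ≠ some '/'
  then "-" else ""

def pvTail (parts : List String) (hi i : Nat) : String :=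
  if i < hi then pvSep parts i ++ parts.getD i "" ++ pvTail parts hi (i + 1) else ""
termination_by hi - i

theorem pvLast_append (r e : String) (he : e ≠ "") :
    PySem.Str.pyGet? (r ++ e) (-1) = PySem.Str.pyGet? e (-1) := by
  simp only [PySem.Str.pyGet?_eq, PySem.Chars.pyGet?_eq_listPyGet?, PySem.List.pyGet?_neg_one,
    String.toList_append]
  exact List.getLast?_append_of_ne_nil _ (by simpa [String.toList_eq_nil_iff] using he)

theorem pvTail_stop (parts : List String) (hi i : Nat) (h : ¬ i < hi) :
    pvTail parts hi i = "" := by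
  rw [pvTail.eq_def, if_neg h]

theorem pvTail_step (parts : List String) (hi i : Nat) (h : i < hi) :
    pvTail parts hi i = pvSep parts i ++ parts.getD i "" ++ pvTail parts hi (i + 1) := by
  rw [pvTail.eq_def, if_pos h]

theorem pvTail_split (parts : List String) (hi : Nat) :
    ∀ (n i mid : Nat), mid - i = n → i ≤ mid → mid ≤ hi →
    pvTail parts hi i = pvTail parts mid i ++ pvTail parts hi mid := by
  intro n
  induction n with
  | zero =>
    intro i mid h1 h2 _
    have : i = mid := by omega
    subst this
    rw [pvTail_stop parts i i (by omega)]
    simp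
  | succ k ih =>
    intro i mid h1 h2 hmh
    rw [pvTail_step parts hi i (by omega), pvTail_step parts mid i (by omega),
      ih (i + 1) mid (by omega) (by omega) hmh]
    simp [String.append_assoc]

theorem pvGlue_eq (parts : List String) :
    ∀ (n lo hi : Nat), hi - lo = n → lo < hi →
    pvGlue parts lo hi = parts.getD lo "" ++ pvTail parts hi (lo + 1) := by
  intro n
  induction n using Nat.strong_induction_on with
  | _ n ih =>
    intro lo hi hn hlt
    by_cases hb : hi ≤ lo + 1
    · have : hi = lo + 1 := by omega
      subst this
      rw [pvGlue.eq_def, if_pos (by omega), pvTail_stop parts (lo + 1) (lo + 1) (by omega)]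
      simp
    · have hmid1 : lo < (lo + hi) / 2 := by omega
      have hmid2 : (lo + hi) / 2 < hi := by omega
      rw [pvGlue.eq_def, if_neg hb]
      simp only
      rw [ih ((lo + hi) / 2 - lo) (by omega) lo _ rfl hmid1,
          ih (hi - (lo + hi) / 2) (by omega) _ hi rfl hmid2,
          pvTail_split parts hi ((lo + hi) / 2 - (lo + 1)) (lo + 1) ((lo + hi) / 2)
            rfl (by omega) (by omega),
          pvTail_step parts hi ((lo + hi) / 2) hmid2]
      by_cases hc : PySem.Str.pyGet? (parts.getD ((lo + hi) / 2) "") 0 ≠ some '.' ∧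
          PySem.Str.pyGet? (parts.getD ((lo + hi) / 2 - 1) "") (-1) ≠ some '/'
      · have hsep : pvSep parts ((lo + hi) / 2) = "-" := by
          unfold pvSep; rw [if_pos hc]
        rw [if_pos hc, hsep]; simp [String.append_assoc]
      · have hsep : pvSep parts ((lo + hi) / 2) = "" := by
          unfold pvSep; rw [if_neg hc]
        rw [if_neg hc, hsep]; simp [String.append_assoc]

theorem pvALoop_eq (parts : List String) :
    ∀ (t : List String) (i : Nat) (r : String),
    parts.drop i = t → 1 ≤ i →
    (∀ s ∈ t, s ≠ "") →
    PySem.Str.pyGet? r (-1) = PySem.Str.pyGet? (parts.getD (i - 1) "") (-1) →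
    pvALoop t r = r ++ pvTail parts parts.length i := by
  intro t
  induction t with
  | nil =>
    intro i r hdrop _ _ _
    have hlen : parts.length ≤ i := List.drop_eq_nil_iff.mp hdrop
    rw [pvTail_stop parts parts.length i (by omega)]
    simp [pvALoop]
  | cons e rest ihl =>
    intro i r hdrop hi1 hne hlast
    have hget : parts[i]? = some e := by
      rw [← List.head?_drop, hdrop]; rfl
    obtain ⟨hilt, -⟩ := List.getElem?_eq_some_iff.mp hget
    have hgetD : parts.getD i "" = e := by
      simp [List.getD, hget]
    have he : e ≠ "" := hne e (by simp)
    have hdrop' : parts.drop (i + 1) = rest := by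
      rw [← List.tail_drop, hdrop]; rfl
    have hlast' : PySem.Str.pyGet? e (-1) =
        PySem.Str.pyGet? (parts.getD (i + 1 - 1) "") (-1) := by
      simp [List.getD, hget]
    rw [pvTail_step parts parts.length i hilt, hgetD]
    simp only [pvALoop, hlast, pvSep, hgetD]
    by_cases hc : PySem.Str.pyGet? e 0 ≠ some '.' ∧
        PySem.Str.pyGet? (parts.getD (i - 1) "") (-1) ≠ some '/'
    · rw [if_pos hc, if_pos hc,
        ihl (i + 1) (r ++ "-" ++ e) hdrop' (by omega) (fun s hs => hne s (by simp [hs]))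
          (by rw [pvLast_append _ _ he]; exact hlast')]
      simp [String.append_assoc]
    · rw [if_neg hc, if_neg hc,
        ihl (i + 1) (r ++ e) hdrop' (by omega) (fun s hs => hne s (by simp [hs]))
          (by rw [pvLast_append _ _ he]; exact hlast')]
      simp [String.append_assoc]

-- ===== VERDICT (by name: the statement is the Claim_ definition above) =====
theorem concatenate_strings_spec : Claim_equal_concatenate_strings := by
  intro str_list _ hpre
  unfold Spec_concatenate_strings
  match str_list with
  | [] => exact absurd hpre.1 (by simp)
  | h :: t =>
    simp only [concatenate_strings, concatenate_strings_alt]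
    rw [pvGlue_eq (h :: t) ((h :: t).length - 0) 0 (h :: t).length rfl (by simp)]
    rw [pvALoop_eq (h :: t) t 1 h rfl (le_refl 1) hpre.2.1 (by simp)]
    simp
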